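-- pv_equiv track=rewrite | github.com/david-cattermole/mayaMatchMoveSolver | python/mmSolver/tools/loadmarker/lib/interface.py | get_closest_frame
-- ===== SOURCE A (Python) =====
-- def get_closest_frame(frame, value):
--     """
--     Get the closest frame in the dictionary value.
--
--     :param frame: An int for the frame to look up.
--     :param value: A dict with keys as the frames to look up.
--
--     Returns the closest frame in the dict value.
--     """
--     keys = value.keys()
--     int_keys = list()
--     for key in keys:
--         int_keys.append(int(key))
--     keys = sorted(int_keys)
--     diff = int()
--     closest_frame = None
--     for key in keys:
--         if closest_frame is None:
--             closest_frame = key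
--             diff = frame - closest_frame
--         if (key <= frame) and (key > closest_frame):
--             closest_frame = key
--         diff = closest_frame - frame
--     keys.reverse()
--     closest_frame_rev = None
--     for key in keys:
--         if closest_frame_rev is None:
--             closest_frame_rev = key
--             diff = frame - closest_frame_rev
--         if (key >= frame) and (key < closest_frame_rev):
--             closest_frame_rev = key
--         diff = closest_frame_rev - frame
--     diffRef = abs(closest_frame_rev - frame)
--     diff = abs(closest_frame - frame)
--     if diffRef < diff:
--         closest_frame = closest_frame_rev
--     return closest_frame
-- ===== SOURCE B (Python) =====
-- def get_closest_frame(frame, value):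
--     """
--     Get the closest frame in the dictionary value.
--
--     Single pass: minimise the pair (abs(int(key) - frame), int(key));
--     the lexicographic tie-break picks the lower key, exactly A's rule.
--     """
--     best = None
--     for key in value.keys():
--         k = int(key)
--         d = abs(k - frame)
--         if best is None or (d, k) < best:
--             best = (d, k)
--     return best[1]
-- ===== Notes on version B (the rewrite author's own statement) =====
-- stated objective: faster
-- what changed: Replaces A's sort plus two directional scans (forward for the largest key <= frame, reversed for the smallest key >= frame, then comparing the two candidates) with one unsorted pass keeping the key minimising (abs(key-frame), key), whose lexicographic tie-break reproduces A's preference for the lower key.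
-- outside the precondition, e.g. on get_closest_frame(5, {}): A raises TypeError, B raises TypeError
import Mathlib
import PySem

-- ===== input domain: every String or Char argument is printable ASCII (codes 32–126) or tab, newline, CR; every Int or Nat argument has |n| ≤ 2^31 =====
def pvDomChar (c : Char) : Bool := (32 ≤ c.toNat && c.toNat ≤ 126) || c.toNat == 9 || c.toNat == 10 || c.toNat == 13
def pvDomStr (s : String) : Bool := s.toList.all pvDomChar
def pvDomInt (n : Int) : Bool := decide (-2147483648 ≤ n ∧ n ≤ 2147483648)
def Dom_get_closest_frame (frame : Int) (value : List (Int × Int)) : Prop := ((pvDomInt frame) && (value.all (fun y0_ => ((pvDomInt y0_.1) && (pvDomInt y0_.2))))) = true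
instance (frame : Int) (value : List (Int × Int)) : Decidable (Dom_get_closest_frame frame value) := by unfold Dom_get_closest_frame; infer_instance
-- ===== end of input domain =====

-- B changes the algorithm: one unsorted pass minimising (|key - frame|, key) instead of
-- A's sort + forward scan + reversed scan + comparison of the two candidates (faster, O(n) vs O(n log n)).

-- ===== PORT A =====
-- Literal transliteration: build int_keys by appending, sort ascending, forward scan for the
-- below-candidate, reversed scan for the above-candidate, pick by strict abs-difference.
-- The two loop states are Options (Python's None); the final reads use getD 0, reached only
-- outside Pre_ (empty dict, where Python raises TypeError).
def get_closest_frame (frame : Int) (value : List (Int × Int)) : Int :=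
  let int_keys : List Int := value.foldl (fun acc kv => acc ++ [kv.1]) []
  let keys := PySem.List.sorted int_keys (fun x => x) false
  let closest_frame : Option Int :=
    keys.foldl (fun cf key =>
      match cf with
      | none => some key          -- first iteration: set closest; the inner test key > key fails
      | some c => if key ≤ frame ∧ c < key then some key else some c) none
  let keysRev := keys.reverse
  let closest_frame_rev : Option Int :=
    keysRev.foldl (fun cf key =>
      match cf with
      | none => some key
      | some c => if frame ≤ key ∧ key < c then some key else some c) none
  let diffRef := |closest_frame_rev.getD 0 - frame|
  let diff := |closest_frame.getD 0 - frame|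
  if diffRef < diff then closest_frame_rev.getD 0 else closest_frame.getD 0

-- ===== PORT B =====
-- Literal transliteration of Source B: fold keeping the best (d, k) pair under Python tuple <.
def get_closest_frame_alt (frame : Int) (value : List (Int × Int)) : Int :=
  let best : Option (Int × Int) :=
    value.foldl (fun best kv =>
      let k := kv.1
      let d := |k - frame|
      match best with
      | none => some (d, k)
      | some b => if d < b.1 ∨ (d = b.1 ∧ k < b.2) then some (d, k) else some b) none
  (best.getD (0, 0)).2

-- ===== PRECONDITION & SPEC =====
-- Pre_ excludes only the empty dict, where Python A raises TypeError (abs(None - frame)).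
def Pre_get_closest_frame (frame : Int) (value : List (Int × Int)) : Prop := value ≠ []
instance (frame : Int) (value : List (Int × Int)) : Decidable (Pre_get_closest_frame frame value) := by unfold Pre_get_closest_frame; infer_instance
def pvWitness_get_closest_frame : Int × (List (Int × Int)) := (3, [(1, 0), (7, 0)])

def Spec_get_closest_frame (frame : Int) (value : List (Int × Int)) (out : Int) : Prop := out = get_closest_frame_alt frame value
instance (frame : Int) (value : List (Int × Int)) (out : Int) : Decidable (Spec_get_closest_frame frame value out) := by unfold Spec_get_closest_frame; infer_instance

-- ===== CLAIM (what is proved, stated in full; the proofs are below) =====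
def Claim_equal_get_closest_frame : Prop := ∀ (frame : Int) (value : List (Int × Int)), Dom_get_closest_frame frame value → Pre_get_closest_frame frame value → Spec_get_closest_frame frame value (get_closest_frame frame value)

-- ===== LEMMAS AND PROOFS =====

-- lexicographic "at least as close, lower key on ties" order used to characterise both results
def pvLex (f a b : Int) : Prop := |a - f| < |b - f| ∨ (|a - f| = |b - f| ∧ a ≤ b)

-- the common characterisation: r is the key of ks minimising (|k - f|, k)
def pvP (f : Int) (ks : List Int) (r : Int) : Prop := r ∈ ks ∧ ∀ k ∈ ks, pvLex f r k

theorem pvLex_refl (f a : Int) : pvLex f a a := Or.inr ⟨rfl, le_refl _⟩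

theorem pvLex_trans {f a b c : Int} (h1 : pvLex f a b) (h2 : pvLex f b c) : pvLex f a c := by
  unfold pvLex at *
  rcases abs_cases (a - f) with ⟨ha, _⟩ | ⟨ha, _⟩ <;>
  rcases abs_cases (b - f) with ⟨hb, _⟩ | ⟨hb, _⟩ <;>
  rcases abs_cases (c - f) with ⟨hc, _⟩ | ⟨hc, _⟩ <;> omega

theorem pvLex_antisymm {f a b : Int} (h1 : pvLex f a b) (h2 : pvLex f b a) : a = b := by
  unfold pvLex at *
  rcases abs_cases (a - f) with ⟨ha, _⟩ | ⟨ha, _⟩ <;>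
  rcases abs_cases (b - f) with ⟨hb, _⟩ | ⟨hb, _⟩ <;> omega

theorem pvP_unique {f : Int} {ks : List Int} {r r' : Int}
    (h : pvP f ks r) (h' : pvP f ks r') : r = r' :=
  pvLex_antisymm (h.2 r' h'.1) (h'.2 r h.1)

-- int_keys built by repeated append is the map of the firsts
theorem pvIntKeys (value : List (Int × Int)) (acc : List Int) :
    value.foldl (fun acc kv => acc ++ [kv.1]) acc = acc ++ value.map Prod.fst := by
  induction value generalizing acc with
  | nil => simp
  | cons kv t ih => simp [List.foldl, ih]

-- forward loop characterisation (no sortedness needed)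
theorem pvBelow (f : Int) (t : List Int) (c : Int) :
    (t.foldl (fun c key => if key ≤ f ∧ c < key then key else c) c = c ∨
      (t.foldl (fun c key => if key ≤ f ∧ c < key then key else c) c ∈ t ∧
        t.foldl (fun c key => if key ≤ f ∧ c < key then key else c) c ≤ f)) ∧
    c ≤ t.foldl (fun c key => if key ≤ f ∧ c < key then key else c) c ∧
    ∀ k ∈ t, k ≤ f → k ≤ t.foldl (fun c key => if key ≤ f ∧ c < key then key else c) c := by
  induction t generalizing c with
  | nil => simp
  | cons k t ih =>
    simp only [List.foldl_cons]
    by_cases hk : k ≤ f ∧ c < k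
    · rw [if_pos hk]
      rcases ih k with ⟨h1, h2, h3⟩
      refine ⟨?_, by omega, ?_⟩
      · rcases h1 with h | h
        · exact Or.inr ⟨by simp [h], by omega⟩
        · exact Or.inr ⟨List.mem_cons_of_mem _ h.1, h.2⟩
      · intro k' hk' hkf
        rcases List.mem_cons.mp hk' with rfl | hm
        · omega
        · exact h3 k' hm hkf
    · rw [if_neg hk]
      rcases ih c with ⟨h1, h2, h3⟩
      refine ⟨?_, h2, ?_⟩
      · rcases h1 with h | h
        · exact Or.inl h
        · exact Or.inr ⟨List.mem_cons_of_mem _ h.1, h.2⟩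
      · intro k' hk' hkf
        rcases List.mem_cons.mp hk' with rfl | hm
        · omega
        · exact h3 k' hm hkf

-- reversed loop characterisation (mirror image)
theorem pvAbove (f : Int) (t : List Int) (c : Int) :
    (t.foldl (fun c key => if f ≤ key ∧ key < c then key else c) c = c ∨
      (t.foldl (fun c key => if f ≤ key ∧ key < c then key else c) c ∈ t ∧
        f ≤ t.foldl (fun c key => if f ≤ key ∧ key < c then key else c) c)) ∧
    t.foldl (fun c key => if f ≤ key ∧ key < c then key else c) c ≤ c ∧
    ∀ k ∈ t, f ≤ k → t.foldl (fun c key => if f ≤ key ∧ key < c then key else c) c ≤ k := by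
  induction t generalizing c with
  | nil => simp
  | cons k t ih =>
    simp only [List.foldl_cons]
    by_cases hk : f ≤ k ∧ k < c
    · rw [if_pos hk]
      rcases ih k with ⟨h1, h2, h3⟩
      refine ⟨?_, by omega, ?_⟩
      · rcases h1 with h | h
        · exact Or.inr ⟨by simp [h], by omega⟩
        · exact Or.inr ⟨List.mem_cons_of_mem _ h.1, h.2⟩
      · intro k' hk' hkf
        rcases List.mem_cons.mp hk' with rfl | hm
        · omega
        · exact h3 k' hm hkf
    · rw [if_neg hk]
      rcases ih c with ⟨h1, h2, h3⟩
      refine ⟨?_, h2, ?_⟩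
      · rcases h1 with h | h
        · exact Or.inl h
        · exact Or.inr ⟨List.mem_cons_of_mem _ h.1, h.2⟩
      · intro k' hk' hkf
        rcases List.mem_cons.mp hk' with rfl | hm
        · omega
        · exact h3 k' hm hkf

-- B's fold computes the pvP-minimiser
theorem pvFoldB (f : Int) (t : List (Int × Int)) (b : Int) :
    ∃ r, t.foldl (fun best kv =>
        let k := kv.1
        let d := |k - f|
        match best with
        | none => some (d, k)
        | some p => if d < p.1 ∨ (d = p.1 ∧ k < p.2) then some (d, k) else some p)
        (some (|b - f|, b)) = some (|r - f|, r) ∧ pvP f (b :: t.map Prod.fst) r := by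
  induction t generalizing b with
  | nil => exact ⟨b, rfl, List.mem_singleton_self b, by simpa using pvLex_refl f b⟩
  | cons kv t ih =>
    by_cases h : |kv.1 - f| < |b - f| ∨ (|kv.1 - f| = |b - f| ∧ kv.1 < b)
    · rcases ih kv.1 with ⟨r, hr, hm, hall⟩
      refine ⟨r, by simpa [h] using hr, List.mem_cons_of_mem _ hm, ?_⟩
      have hb' : pvLex f kv.1 b := by
        unfold pvLex; rcases h with h | h
        · exact Or.inl h
        · exact Or.inr ⟨h.1, le_of_lt h.2⟩
      intro k hk
      rcases List.mem_cons.mp hk with rfl | hk'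
      · exact pvLex_trans (hall kv.1 List.mem_cons_self) hb'
      · exact hall k hk'
    · rcases ih b with ⟨r, hr, hm, hall⟩
      refine ⟨r, by simpa [h] using hr, ?_, ?_⟩
      · rcases List.mem_cons.mp hm with rfl | hm'
        · exact List.mem_cons_self
        · exact List.mem_cons_of_mem _ (List.mem_cons_of_mem _ hm')
      · have hb' : pvLex f b kv.1 := by
          unfold pvLex
          rcases abs_cases (kv.1 - f) with ⟨h1, _⟩ | ⟨h1, _⟩ <;>
          rcases abs_cases (b - f) with ⟨h2, _⟩ | ⟨h2, _⟩ <;> unfold pvLex at h <;> omega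
        intro k hk
        rcases List.mem_cons.mp hk with rfl | hk'
        · exact hall k List.mem_cons_self
        · rcases List.mem_cons.mp hk' with rfl | hk''
          · exact pvLex_trans (hall b List.mem_cons_self) hb'
          · exact hall k (List.mem_cons_of_mem _ hk'')

theorem pvAltP (f : Int) (value : List (Int × Int)) (hne : value ≠ []) :
    pvP f (value.map Prod.fst) (get_closest_frame_alt f value) := by
  obtain ⟨kv, t, rfl⟩ := List.exists_cons_of_ne_nil hne
  rcases pvFoldB f t kv.1 with ⟨r, hr, hP⟩
  have h2 : get_closest_frame_alt f (kv :: t) = r := by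
    simp [get_closest_frame_alt, List.foldl_cons, hr]
  rw [h2]
  simpa using hP

-- the Option-state loops of port A reduce to plain Int folds once the state is `some`
theorem pvLoop1 (f : Int) (t : List Int) (c : Int) :
    t.foldl (fun cf key =>
      match cf with
      | none => some key
      | some c => if key ≤ f ∧ c < key then some key else some c) (some c)
    = some (t.foldl (fun c key => if key ≤ f ∧ c < key then key else c) c) := by
  induction t generalizing c with
  | nil => rfl
  | cons k t ih =>
    simp only [List.foldl_cons]
    by_cases h : k ≤ f ∧ c < k
    · simp only [if_pos h]; exact ih k
    · simp only [if_neg h]; exact ih c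

theorem pvLoop2 (f : Int) (t : List Int) (c : Int) :
    t.foldl (fun cf key =>
      match cf with
      | none => some key
      | some c => if f ≤ key ∧ key < c then some key else some c) (some c)
    = some (t.foldl (fun c key => if f ≤ key ∧ key < c then key else c) c) := by
  induction t generalizing c with
  | nil => rfl
  | cons k t ih =>
    simp only [List.foldl_cons]
    by_cases h : f ≤ k ∧ k < c
    · simp only [if_pos h]; exact ih k
    · simp only [if_neg h]; exact ih c

theorem pvAP (f : Int) (value : List (Int × Int)) (hne : value ≠ []) :
    pvP f (value.map Prod.fst) (get_closest_frame f value) := by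
  have hik : value.foldl (fun acc kv => acc ++ [kv.1]) ([] : List Int) = value.map Prod.fst := by
    simpa using pvIntKeys value []
  have hksne : value.map Prod.fst ≠ [] := by simpa using hne
  have hsne : PySem.List.sorted (value.map Prod.fst) (fun x => x) false ≠ [] := by
    rw [Ne, PySem.List.sorted_eq_nil_iff]; exact hksne
  obtain ⟨h, t, hst⟩ := List.exists_cons_of_ne_nil hsne
  have hrne : (PySem.List.sorted (value.map Prod.fst) (fun x => x) false).reverse ≠ [] := by
    simpa using hsne
  obtain ⟨h', t', hrev⟩ := List.exists_cons_of_ne_nil hrne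
  -- loop characterisations
  obtain ⟨hb1, hb2, hb3⟩ := pvBelow f t h
  obtain ⟨ha1, ha2, ha3⟩ := pvAbove f t' h'
  -- the two loop results
  set below := t.foldl (fun c key => if key ≤ f ∧ c < key then key else c) h with hbdef
  set above := t'.foldl (fun c key => if f ≤ key ∧ key < c then key else c) h' with hadef
  -- the port equals the branch on the two candidates
  have hA : get_closest_frame f value = (if |above - f| < |below - f| then above else below) := by
    simp only [get_closest_frame, hik]
    rw [hrev, hst]
    simp only [List.foldl_cons, pvLoop1, pvLoop2, Option.getD_some]
    rfl
  -- membership transfers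
  have hmem : ∀ x, x ∈ PySem.List.sorted (value.map Prod.fst) (fun x => x) false ↔
      x ∈ value.map Prod.fst := fun x => PySem.List.mem_sorted _ _ _ x
  have hmin : ∀ y ∈ value.map Prod.fst, h ≤ y := by
    intro y hy
    simpa using PySem.List.key_head_sorted_le _ _ hst y hy
  have hmax : ∀ y ∈ value.map Prod.fst, y ≤ h' := by
    intro y hy
    have hp : ((PySem.List.sorted (value.map Prod.fst) (fun x => x) false).reverse).Pairwise
        (fun a b => b ≤ a) :=
      List.pairwise_reverse.mpr (by simpa using PySem.List.sorted_pairwise (value.map Prod.fst) (fun x => x))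
    rw [hrev, List.pairwise_cons] at hp
    have : y ∈ (PySem.List.sorted (value.map Prod.fst) (fun x => x) false).reverse := by
      simpa [hmem y] using hy
    rw [hrev] at this
    rcases List.mem_cons.mp this with rfl | hmem'
    · exact le_refl y
    · exact hp.1 y hmem'
  have hbelmem : below ∈ value.map Prod.fst := by
    rcases hb1 with h0 | h0
    · rw [← hmem]; rw [hst]; rw [h0]; exact List.mem_cons_self
    · rw [← hmem]; rw [hst]; exact List.mem_cons_of_mem _ h0.1
  have habvmem : above ∈ value.map Prod.fst := by
    have : above ∈ (PySem.List.sorted (value.map Prod.fst) (fun x => x) false).reverse := by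
      rw [hrev]
      rcases ha1 with h0 | h0
      · rw [h0]; exact List.mem_cons_self
      · exact List.mem_cons_of_mem _ h0.1
    rw [List.mem_reverse] at this
    exact (hmem above).mp this
  -- directional bounds
  have Fbel : ∀ k ∈ value.map Prod.fst, k ≤ f → k ≤ below := by
    intro k hk hkf
    have : k ∈ PySem.List.sorted (value.map Prod.fst) (fun x => x) false := (hmem k).mpr hk
    rw [hst] at this
    rcases List.mem_cons.mp this with rfl | hm
    · exact hb2
    · exact hb3 k hm hkf
  have Fbel2 : ∀ k ∈ value.map Prod.fst, k ≤ f → below ≤ f := by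
    intro k hk hkf
    rcases hb1 with h0 | h0
    · have := hmin k hk; omega
    · exact h0.2
  have Fbel3 : ∀ k ∈ value.map Prod.fst, below ≤ f ∨ below ≤ k := by
    intro k hk
    rcases hb1 with h0 | h0
    · exact Or.inr (h0 ▸ hmin k hk)
    · exact Or.inl h0.2
  have Fabv : ∀ k ∈ value.map Prod.fst, f ≤ k → above ≤ k := by
    intro k hk hkf
    have : k ∈ (PySem.List.sorted (value.map Prod.fst) (fun x => x) false).reverse := by
      rw [List.mem_reverse]; exact (hmem k).mpr hk
    rw [hrev] at this
    rcases List.mem_cons.mp this with rfl | hm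
    · exact ha2
    · exact ha3 k hm hkf
  have Fabv2 : ∀ k ∈ value.map Prod.fst, f ≤ k → f ≤ above := by
    intro k hk hkf
    rcases ha1 with h0 | h0
    · have := hmax k hk; omega
    · exact h0.2
  -- assemble pvP
  rw [hA]
  constructor
  · split_ifs <;> assumption
  · intro k hk
    rcases le_total k f with hkf | hkf
    · have A1 : k ≤ below := Fbel k hk hkf
      have A2 : below ≤ f := Fbel2 k hk hkf
      unfold pvLex
      split_ifs with hbr <;>
        rcases abs_cases (above - f) with ⟨e1, _⟩ | ⟨e1, _⟩ <;>
        rcases abs_cases (below - f) with ⟨e2, _⟩ | ⟨e2, _⟩ <;>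
        rcases abs_cases (k - f) with ⟨e3, _⟩ | ⟨e3, _⟩ <;> omega
    · have A1 : above ≤ k := Fabv k hk hkf
      have A2 : f ≤ above := Fabv2 k hk hkf
      have A3 : below ≤ f ∨ below ≤ k := Fbel3 k hk
      unfold pvLex
      split_ifs with hbr <;>
        rcases abs_cases (above - f) with ⟨e1, _⟩ | ⟨e1, _⟩ <;>
        rcases abs_cases (below - f) with ⟨e2, _⟩ | ⟨e2, _⟩ <;>
        rcases abs_cases (k - f) with ⟨e3, _⟩ | ⟨e3, _⟩ <;> omega

-- ===== VERDICT (by name: the statement is the Claim_ definition above) =====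
theorem get_closest_frame_spec : Claim_equal_get_closest_frame := by
  intro f value _ hpre
  exact pvP_unique (pvAP f value hpre) (pvAltP f value hpre)
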